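-- pv_equiv track=rewrite | github.com/Aidit-Models/CRISPR-AIdit | training-evaluation/benchmark-datasets/DSB/unifying_lindel_data_label_into_the_same_format.py | pan_deletion_left
-- ===== SOURCE A (Python) =====
-- def pan_deletion_left(read_left, delt_nucles, read_right):
--     while True:
--         delt_one_nucle = delt_nucles[-1]
--         read_left_one_nucle = read_left[-1]
--         if delt_one_nucle == read_left_one_nucle:
--             read_left = read_left[:-1]
--             delt_nucles = delt_one_nucle + delt_nucles[:-1]
--             read_right = delt_one_nucle + read_right
--         else:
--             break
--     return (read_left, delt_nucles, read_right)
-- ===== SOURCE B (Python) =====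
-- def pan_deletion_left(read_left, delt_nucles, read_right):
--     n, m = len(read_left), len(delt_nucles)
--     k = 0
--     for ch in reversed(read_left):
--         if ch != delt_nucles[m - 1 - (k % m)]:
--             break
--         k += 1
--     r = (m - k % m) % m
--     return (read_left[:n - k],
--             delt_nucles[r:] + delt_nucles[:r],
--             read_left[n - k:] + read_right)
-- ===== Notes on version B (the rewrite author's own statement) =====
-- stated objective: faster
-- what changed: Instead of A's while loop that rebuilds all three strings one character-slide at a time, B counts the slide length k with a single backward cyclic character scan and then builds the three result strings once with slices.
import Mathlib
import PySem

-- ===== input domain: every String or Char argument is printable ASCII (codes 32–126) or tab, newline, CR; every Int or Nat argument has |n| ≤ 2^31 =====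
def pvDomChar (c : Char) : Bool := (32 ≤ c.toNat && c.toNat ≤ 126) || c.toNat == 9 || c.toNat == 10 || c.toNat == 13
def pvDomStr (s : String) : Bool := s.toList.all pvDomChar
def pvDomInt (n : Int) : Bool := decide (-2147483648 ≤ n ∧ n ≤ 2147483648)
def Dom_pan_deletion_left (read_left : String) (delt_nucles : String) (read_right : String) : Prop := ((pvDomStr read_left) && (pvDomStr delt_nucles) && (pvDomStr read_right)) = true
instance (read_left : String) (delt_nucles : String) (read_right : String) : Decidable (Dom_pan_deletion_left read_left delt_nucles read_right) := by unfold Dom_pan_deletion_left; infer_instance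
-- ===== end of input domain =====

-- B replaces A's while loop, which rebuilds all three strings on every one-character slide step,
-- by one backward cyclic scan that counts the shift length k and then builds the results once with
-- slices (objective: faster — O(n+m+r) instead of O(k*(n+m+r)) string rebuilding).

-- ===== PORT A =====
-- A's while-True loop: each iteration shortens read_left by one, so read_left.length + 1 fuel
-- is enough on every input where the loop terminates normally; when Python raises IndexError
-- (an empty string indexed with [-1]) the pyGet? is none and the port stops (outside Pre_).
def pvLoopA : Nat → List Char → List Char → List Char → (List Char × List Char × List Char)
  | 0, rl, d, rr => (rl, d, rr)
  | fuel+1, rl, d, rr =>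
    match PySem.List.pyGet? d (-1 : Int), PySem.List.pyGet? rl (-1 : Int) with
    | some dc, some lc =>
      if dc = lc then
        pvLoopA fuel (PySem.List.slice rl none (some (-1 : Int)))
                     (dc :: PySem.List.slice d none (some (-1 : Int)))
                     (dc :: rr)
      else (rl, d, rr)
    | _, _ => (rl, d, rr)  -- Python raises IndexError here (excluded by Pre_)

def pan_deletion_left (read_left : String) (delt_nucles : String) (read_right : String) : List String :=
  match pvLoopA (read_left.toList.length + 1) read_left.toList delt_nucles.toList read_right.toList with
  | (a, b, c) => [String.mk a, String.mk b, String.mk c]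

-- ===== PORT B =====
-- the for-loop of Source B over reversed(read_left) with counter k and early break
def pvCountK (d : List Char) (m : Nat) : List Char → Nat → Nat
  | [], k => k
  | ch :: rest, k =>
    if ch ≠ d.getD (m - 1 - k % m) ' ' then k
    else pvCountK d m rest (k+1)

def pan_deletion_left_alt (read_left : String) (delt_nucles : String) (read_right : String) : List String :=
  let L := read_left.toList
  let D := delt_nucles.toList
  let n := L.length
  let m := D.length
  let k := pvCountK D m L.reverse 0
  let r := (m - k % m) % m
  [String.mk (L.take (n - k)),
   String.mk (D.drop r ++ D.take r),
   String.mk (L.drop (n - k) ++ read_right.toList)]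

-- ===== PRECONDITION & SPEC =====
-- Pre_ excludes exactly the inputs where Python A raises IndexError: an empty delt_nucles
-- (delt_nucles[-1] raises) or a read_left whose characters all match the cyclic backward scan,
-- so the loop consumes read_left entirely and then read_left[-1] raises.
def Pre_pan_deletion_left (read_left : String) (delt_nucles : String) (read_right : String) : Prop :=
  delt_nucles.toList ≠ [] ∧
  ∃ i : Nat, i < read_left.toList.length ∧
    read_left.toList.reverse.getD i ' ' ≠
      delt_nucles.toList.getD (delt_nucles.toList.length - 1 - i % delt_nucles.toList.length) ' '
instance (read_left : String) (delt_nucles : String) (read_right : String) : Decidable (Pre_pan_deletion_left read_left delt_nucles read_right) := by unfold Pre_pan_deletion_left; infer_instance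

def pvWitness_pan_deletion_left : String × String × String := ("AC", "C", "G")

def Spec_pan_deletion_left (read_left : String) (delt_nucles : String) (read_right : String) (out : List String) : Prop := out = pan_deletion_left_alt read_left delt_nucles read_right
instance (read_left : String) (delt_nucles : String) (read_right : String) (out : List String) : Decidable (Spec_pan_deletion_left read_left delt_nucles read_right out) := by unfold Spec_pan_deletion_left; infer_instance

-- ===== CLAIM (what is proved, stated in full; the proofs are below) =====
def Claim_equal_pan_deletion_left : Prop := ∀ (read_left : String) (delt_nucles : String) (read_right : String), Dom_pan_deletion_left read_left delt_nucles read_right → Pre_pan_deletion_left read_left delt_nucles read_right → Spec_pan_deletion_left read_left delt_nucles read_right (pan_deletion_left read_left delt_nucles read_right)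

-- ===== LEMMAS AND PROOFS =====

-- B's rotation-by-slices, as a function of k (proof-side abbreviation)
def pvRotSlice (D : List Char) (k : Nat) : List Char :=
  D.drop ((D.length - k % D.length) % D.length) ++ D.take ((D.length - k % D.length) % D.length)

-- A's one-step rotation
def pvRot (D : List Char) : List Char := D.getLast?.getD ' ' :: D.dropLast

theorem pvCountK_ge (d : List Char) (m : Nat) :
    ∀ (l : List Char) (k : Nat), k ≤ pvCountK d m l k := by
  intro l
  induction l with
  | nil => intro k; simp [pvCountK]
  | cons ch rest ih =>
    intro k
    simp only [pvCountK]
    split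
    · exact le_refl k
    · exact le_trans (Nat.le_succ k) (ih (k+1))

theorem pvCountK_lt (d : List Char) (m : Nat) :
    ∀ (l : List Char) (j : Nat),
      (∃ i : Nat, i < l.length ∧ l.getD i ' ' ≠ d.getD (m - 1 - (j + i) % m) ' ') →
      pvCountK d m l j < j + l.length := by
  intro l
  induction l with
  | nil => intro j ⟨i, hi, _⟩; simp at hi
  | cons ch rest ih =>
    intro j ⟨i, hi, hne⟩
    simp only [pvCountK]
    split
    · simp only [List.length_cons]; omega
    · rename_i hcond
      have hch : ch = d.getD (m - 1 - j % m) ' ' := by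
        by_contra h; exact hcond h
      have : ∃ i' : Nat, i' < rest.length ∧ rest.getD i' ' ' ≠ d.getD (m - 1 - ((j+1) + i') % m) ' ' := by
        cases i with
        | zero =>
          exfalso
          simp only [Nat.add_zero] at hne
          exact hne (by simpa using hch)
        | succ i' =>
          refine ⟨i', by simpa using hi, ?_⟩
          have : (j + 1 + i') = j + (i' + 1) := by omega
          rw [this]
          simpa using hne
      have := ih (j+1) this
      simp only [List.length_cons]
      omega

-- index shift: the character A's next iteration compares in the rotated delt string
theorem pvIdx_shift (D : List Char) (hD : D ≠ []) (j : Nat) :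
    D.getD (D.length - 1 - (j+1) % D.length) ' ' =
    (pvRot D).getD ((pvRot D).length - 1 - j % (pvRot D).length) ' ' := by
  obtain ⟨T, g, hTg⟩ : ∃ T g, D = T ++ [g] := ⟨D.dropLast, D.getLast hD, (List.dropLast_append_getLast hD).symm⟩
  subst hTg
  have hrot : pvRot (T ++ [g]) = g :: T := by
    simp [pvRot, List.getLast?_append, List.dropLast_append_of_ne_nil]
  rw [hrot]
  have hm : (T ++ [g]).length = T.length + 1 := by simp
  have hlen2 : (g :: T).length = T.length + 1 := by simp
  rw [hm, hlen2]
  have hmpos : 0 < T.length + 1 := by omega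
  obtain ⟨a, hadef, ha⟩ : ∃ a, j % (T.length + 1) = a ∧ a < T.length + 1 :=
    ⟨_, rfl, Nat.mod_lt _ hmpos⟩
  have hsucc : (j + 1) % (T.length + 1) = (a + 1) % (T.length + 1) := by
    conv_lhs => rw [Nat.add_mod]
    conv_rhs => rw [Nat.add_mod, Nat.mod_eq_of_lt ha]
    rw [hadef]
  rw [hadef, hsucc]
  by_cases hlast : a = T.length
  · have h1 : (a + 1) % (T.length + 1) = 0 := by rw [hlast]; simp
    rw [h1, hlast]
    have e1 : T.length + 1 - 1 - 0 = T.length := by omega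
    have e2 : T.length + 1 - 1 - T.length = 0 := by omega
    rw [e1, e2]
    simp [List.getD]
  · have halt : a + 1 < T.length + 1 := by omega
    have h1 : (a + 1) % (T.length + 1) = a + 1 := Nat.mod_eq_of_lt halt
    rw [h1]
    have hLidx : T.length + 1 - 1 - (a + 1) = T.length - 1 - a := by omega
    have hRidx : T.length + 1 - 1 - a = (T.length - 1 - a) + 1 := by omega
    rw [hLidx, hRidx]
    have hlt : T.length - 1 - a < T.length := by omega
    have hL : (T ++ [g]).getD (T.length - 1 - a) ' ' = T.getD (T.length - 1 - a) ' ' := by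
      simp [List.getD, List.getElem?_append_left hlt]
    rw [hL]
    simp [List.getD]

theorem pvCountK_shift (D : List Char) (hD : D ≠ []) :
    ∀ (l : List Char) (j : Nat),
      pvCountK D D.length l (j+1) = pvCountK (pvRot D) (pvRot D).length l j + 1 := by
  intro l
  induction l with
  | nil => intro j; simp [pvCountK]
  | cons ch rest ih =>
    intro j
    simp only [pvCountK]
    rw [pvIdx_shift D hD j]
    split
    · rfl
    · exact ih (j+1)

theorem pvRotSlice_zero (D : List Char) : pvRotSlice D 0 = D := by
  simp [pvRotSlice]

theorem pvRotSlice_shift (D : List Char) (hD : D ≠ []) (k : Nat) :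
    pvRotSlice (pvRot D) k = pvRotSlice D (k+1) := by
  obtain ⟨T, g, rfl⟩ : ∃ T g, D = T ++ [g] := ⟨D.dropLast, D.getLast hD, (List.dropLast_append_getLast hD).symm⟩
  have hrot : pvRot (T ++ [g]) = g :: T := by
    simp [pvRot, List.getLast?_append, List.dropLast_append_of_ne_nil]
  rw [hrot]
  unfold pvRotSlice
  have hlen1 : (g :: T).length = T.length + 1 := by simp
  have hlen2 : (T ++ [g]).length = T.length + 1 := by simp
  rw [hlen1, hlen2]
  have hmpos : 0 < T.length + 1 := by omega
  obtain ⟨a, hadef, ha⟩ : ∃ a, k % (T.length + 1) = a ∧ a < T.length + 1 :=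
    ⟨_, rfl, Nat.mod_lt _ hmpos⟩
  have hsucc : (k + 1) % (T.length + 1) = (a + 1) % (T.length + 1) := by
    conv_lhs => rw [Nat.add_mod]
    conv_rhs => rw [Nat.add_mod, Nat.mod_eq_of_lt ha]
    rw [hadef]
  rw [hadef, hsucc]
  by_cases ha0 : a = 0
  · subst ha0
    have h2 : (T.length + 1 - 0) % (T.length + 1) = 0 := by simp
    rw [h2]
    by_cases hm1 : T.length = 0
    · have hT : T = [] := List.eq_nil_of_length_eq_zero hm1
      subst hT; simp
    · have h1 : (0 + 1) % (T.length + 1) = 1 := Nat.mod_eq_of_lt (by omega)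
      rw [h1]
      have h3 : (T.length + 1 - 1) % (T.length + 1) = T.length := by
        have : T.length + 1 - 1 = T.length := by omega
        rw [this]; exact Nat.mod_eq_of_lt (by omega)
      rw [h3]
      simp [List.take_append_of_le_length]
  · have hr0 : (T.length + 1 - a) % (T.length + 1) = T.length + 1 - a :=
      Nat.mod_eq_of_lt (by omega)
    by_cases hlast : a = T.length
    · have h1 : (a + 1) % (T.length + 1) = 0 := by rw [hlast]; simp
      rw [h1, hr0, hlast]
      have hma : T.length + 1 - T.length = 1 := by omega
      rw [hma]
      simp
    · have halt : a + 1 < T.length + 1 := by omega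
      have h1 : (a + 1) % (T.length + 1) = a + 1 := Nat.mod_eq_of_lt halt
      rw [h1, hr0]
      have hr1 : (T.length + 1 - (a+1)) % (T.length + 1) = T.length - a :=
        by have : T.length + 1 - (a+1) = T.length - a := by omega
           rw [this]; exact Nat.mod_eq_of_lt (by omega)
      rw [hr1]
      have hd1 : (g :: T).drop (T.length + 1 - a) = T.drop (T.length - a) := by
        have : T.length + 1 - a = (T.length - a) + 1 := by omega
        rw [this]; simp
      have ht1 : (g :: T).take (T.length + 1 - a) = g :: T.take (T.length - a) := by
        have : T.length + 1 - a = (T.length - a) + 1 := by omega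
        rw [this]; simp
      have hle : T.length - a ≤ T.length := by omega
      have hd2 : (T ++ [g]).drop (T.length - a) = T.drop (T.length - a) ++ [g] := by
        rw [List.drop_append_of_le_length hle]
      have ht2 : (T ++ [g]).take (T.length - a) = T.take (T.length - a) := by
        rw [List.take_append_of_le_length hle]
      rw [hd1, ht1, hd2, ht2]
      simp

-- the main loop invariant: with k = B's count, A's loop returns B's slices
theorem pvLoopA_eq (k : Nat) :
    ∀ (L D rr : List Char) (fuel : Nat), D ≠ [] →
      pvCountK D D.length L.reverse 0 = k →
      k < L.length → k < fuel →
      pvLoopA fuel L D rr =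
        (L.take (L.length - k), pvRotSlice D k, L.drop (L.length - k) ++ rr) := by
  induction k with
  | zero =>
    intro L D rr fuel hD hcnt hkn hfuel
    obtain ⟨fuel', rfl⟩ : ∃ f, fuel = f + 1 := ⟨fuel - 1, by omega⟩
    have hL : L ≠ [] := by intro h; subst h; simp at hkn
    have hrev : L.reverse = L.getLast hL :: L.dropLast.reverse := by
      conv_lhs => rw [← List.dropLast_append_getLast hL]
      simp
    have hmis : L.getLast hL ≠ D.getD (D.length - 1 - 0 % D.length) ' ' := by
      intro heq
      rw [hrev] at hcnt
      simp only [pvCountK] at hcnt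
      rw [if_neg (by simpa using heq)] at hcnt
      simp only [Nat.zero_add] at hcnt
      have := pvCountK_ge D D.length L.dropLast.reverse 1
      omega
    have hDlast : PySem.List.pyGet? D (-1 : Int) = some (D.getLast hD) := by
      rw [PySem.List.pyGet?_neg_one, List.getLast?_eq_getLast hD]
    have hLlast : PySem.List.pyGet? L (-1 : Int) = some (L.getLast hL) := by
      rw [PySem.List.pyGet?_neg_one, List.getLast?_eq_getLast hL]
    have hgetD : D.getD (D.length - 1 - 0 % D.length) ' ' = D.getLast hD := by
      have hpos : 0 < D.length := List.length_pos_iff.mpr hD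
      have : D.length - 1 - 0 % D.length = D.length - 1 := by simp
      rw [this, List.getD, List.getElem?_eq_getElem (by omega), List.getLast_eq_getElem]
      rfl
    simp only [pvLoopA, hDlast, hLlast]
    rw [if_neg (by rw [← hgetD]; exact fun h => hmis h.symm)]
    rw [pvRotSlice_zero]
    simp
  | succ k ih =>
    intro L D rr fuel hD hcnt hkn hfuel
    obtain ⟨fuel', rfl⟩ : ∃ f, fuel = f + 1 := ⟨fuel - 1, by omega⟩
    have hL : L ≠ [] := by intro h; subst h; simp at hkn
    have hrev : L.reverse = L.getLast hL :: L.dropLast.reverse := by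
      conv_lhs => rw [← List.dropLast_append_getLast hL]
      simp
    have hpos : 0 < D.length := List.length_pos_iff.mpr hD
    have hgetD : D.getD (D.length - 1 - 0 % D.length) ' ' = D.getLast hD := by
      have : D.length - 1 - 0 % D.length = D.length - 1 := by simp
      rw [this, List.getD, List.getElem?_eq_getElem (by omega), List.getLast_eq_getElem]
      rfl
    have hmatch : L.getLast hL = D.getLast hD := by
      by_contra hne
      rw [hrev] at hcnt
      simp only [pvCountK] at hcnt
      rw [if_pos (by rw [hgetD]; simpa using hne)] at hcnt
      omega
    have hcnt' : pvCountK (pvRot D) (pvRot D).length L.dropLast.reverse 0 = k := by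
      rw [hrev] at hcnt
      simp only [pvCountK] at hcnt
      rw [if_neg (by rw [hgetD]; simp [hmatch])] at hcnt
      rw [pvCountK_shift D hD] at hcnt
      omega
    have hrotne : pvRot D ≠ [] := by simp [pvRot]
    have hDlast : PySem.List.pyGet? D (-1 : Int) = some (D.getLast hD) := by
      rw [PySem.List.pyGet?_neg_one, List.getLast?_eq_getLast hD]
    have hLlast : PySem.List.pyGet? L (-1 : Int) = some (L.getLast hL) := by
      rw [PySem.List.pyGet?_neg_one, List.getLast?_eq_getLast hL]
    simp only [pvLoopA, hDlast, hLlast]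
    rw [if_pos hmatch.symm]
    have hslice : ∀ (xs : List Char), PySem.List.slice xs none (some (-1 : Int)) = xs.dropLast :=
      fun xs => PySem.List.slice_to_neg_one xs
    rw [hslice L, hslice D]
    have hrot : D.getLast hD :: D.dropLast = pvRot D := by
      simp [pvRot, List.getLast?_eq_getLast hD]
    rw [hrot]
    have hdLlen : L.dropLast.length = L.length - 1 := by simp
    have hih := ih L.dropLast (pvRot D) (D.getLast hD :: rr) fuel' hrotne hcnt'
      (by omega) (by omega)
    rw [hih]
    have e1 : L.dropLast.take (L.dropLast.length - k) = L.take (L.length - (k+1)) := by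
      have h1 : L.dropLast.length - k = L.length - 1 - k := by simp
      rw [h1, List.dropLast_eq_take, List.take_take]
      congr 1
      omega
    have e2 : pvRotSlice (pvRot D) k = pvRotSlice D (k+1) := pvRotSlice_shift D hD k
    have e3 : L.dropLast.drop (L.dropLast.length - k) ++ (D.getLast hD :: rr) =
        L.drop (L.length - (k+1)) ++ rr := by
      have key : ∀ j, j ≤ L.dropLast.length →
          L.drop j = L.dropLast.drop j ++ [L.getLast hL] := by
        intro j hj
        conv_lhs => rw [← List.dropLast_append_getLast hL]
        rw [List.drop_append_of_le_length hj]
      have h1 : L.dropLast.length - k = L.length - 1 - k := by simp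
      have h2 : L.length - (k+1) = L.length - 1 - k := by omega
      rw [h1, h2, ← hmatch, key (L.length - 1 - k) (by simp)]
      simp
    rw [e1, e2, e3]

-- ===== VERDICT (by name: the statement is the Claim_ definition above) =====
theorem pan_deletion_left_spec : Claim_equal_pan_deletion_left := by
  intro read_left delt_nucles read_right _ hpre
  obtain ⟨hD, i, hi, hne⟩ := hpre
  unfold Spec_pan_deletion_left pan_deletion_left pan_deletion_left_alt
  set L := read_left.toList
  set D := delt_nucles.toList
  have hklt : pvCountK D D.length L.reverse 0 < L.length := by
    have := pvCountK_lt D D.length L.reverse 0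
      ⟨i, by simpa using hi, by simpa using hne⟩
    simpa using this
  rw [pvLoopA_eq (pvCountK D D.length L.reverse 0) L D read_right.toList
    (L.length + 1) hD rfl hklt (by omega)]
  rfl
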